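-- pv_equiv track=rewrite | github.com/jyotinarang2/ExpressionAnalysis | scoreVisualizer.py | change_intermediate_dynamics_values
-- ===== SOURCE A (Python) =====
-- def change_intermediate_dynamics_values(dynamics_contour):
--     for position in range(len(dynamics_contour)):
--         if dynamics_contour[position] > 0:
--             pos = position
--             new_pos = pos+1
--             while new_pos<len(dynamics_contour) and dynamics_contour[new_pos] == 0:
--                 dynamics_contour[new_pos] = dynamics_contour[pos]
--                 new_pos += 1
--                 position += 1
--     return dynamics_contour
-- ===== SOURCE B (Python) =====
-- def change_intermediate_dynamics_values(dynamics_contour):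
--     last = 0
--     for i, x in enumerate(dynamics_contour):
--         if x > 0:
--             last = x
--         elif x == 0:
--             if last > 0:
--                 dynamics_contour[i] = last
--         else:
--             last = 0
--     return dynamics_contour
-- ===== Notes on version B (the rewrite author's own statement) =====
-- stated objective: simpler
-- what changed: Replaces A's nested fill (outer index loop plus inner while-loop that rewrites each zero-run) with a single forward scan carrying the last positive value in a variable, resetting the carry on negatives.
import Mathlib
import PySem

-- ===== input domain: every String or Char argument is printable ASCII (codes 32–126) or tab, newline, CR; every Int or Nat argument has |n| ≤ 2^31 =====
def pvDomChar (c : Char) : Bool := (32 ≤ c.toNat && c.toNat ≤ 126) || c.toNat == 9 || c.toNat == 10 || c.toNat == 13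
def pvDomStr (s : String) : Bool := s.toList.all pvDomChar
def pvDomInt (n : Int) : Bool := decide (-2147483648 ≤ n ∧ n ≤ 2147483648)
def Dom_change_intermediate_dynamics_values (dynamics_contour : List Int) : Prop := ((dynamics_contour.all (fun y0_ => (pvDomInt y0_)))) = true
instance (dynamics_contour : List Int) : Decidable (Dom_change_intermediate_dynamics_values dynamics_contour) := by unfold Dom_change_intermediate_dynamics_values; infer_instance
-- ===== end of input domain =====

set_option maxRecDepth 8192


-- B replaces A's nested fill loops by one forward scan with a carry variable (objective: simpler).
-- Both Pythons mutate the argument list in place and return it; the equivalence proved here is about the return value.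

-- ===== PORT A =====
-- inner 'while new_pos < len and dynamics_contour[new_pos] == 0: dynamics_contour[new_pos] = v; new_pos += 1';
-- the list length is constant, so fuel = length bounds the while exactly (guard kept inside)
def pyFillA : Nat → List Int → Int → Nat → List Int
  | 0, l, _, _ => l
  | f + 1, l, v, j =>
    if j < l.length ∧ l.getD j 0 = 0 then pyFillA f (l.set j v) v (j + 1) else l

-- outer 'for position in range(len(dynamics_contour))': range(len) is computed once, one step per index
-- (the inner bump of 'position' does not affect the range iteration)
def pyOuterA : Nat → List Int → Nat → List Int
  | 0, l, _ => l
  | n + 1, l, i =>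
    pyOuterA n (if 0 < l.getD i 0 then pyFillA l.length l (l.getD i 0) (i + 1) else l) (i + 1)

def change_intermediate_dynamics_values (dynamics_contour : List Int) : List Int :=
  pyOuterA dynamics_contour.length dynamics_contour 0

-- ===== PORT B =====
-- the for-loop of Source B: scan the list carrying 'last', rebuilding each cell
def goB (last : Int) : List Int → List Int
  | [] => []
  | x :: xs =>
    if 0 < x then x :: goB x xs
    else if x = 0 then
      (if 0 < last then last :: goB last xs else x :: goB last xs)
    else x :: goB 0 xs

def change_intermediate_dynamics_values_alt (dynamics_contour : List Int) : List Int :=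
  goB 0 dynamics_contour

-- ===== PRECONDITION & SPEC =====
def Spec_change_intermediate_dynamics_values (dynamics_contour : List Int) (out : List Int) : Prop := out = change_intermediate_dynamics_values_alt dynamics_contour
instance (dynamics_contour : List Int) (out : List Int) : Decidable (Spec_change_intermediate_dynamics_values dynamics_contour out) := by unfold Spec_change_intermediate_dynamics_values; infer_instance

-- ===== CLAIM (what is proved, stated in full; the proofs are below) =====
def Claim_equal_change_intermediate_dynamics_values : Prop := ∀ (dynamics_contour : List Int), Dom_change_intermediate_dynamics_values dynamics_contour → Spec_change_intermediate_dynamics_values dynamics_contour (change_intermediate_dynamics_values dynamics_contour)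

-- ===== LEMMAS AND PROOFS =====

-- fillRun v xs overwrites the leading zero-run of xs with v (the effect of A's inner while on the suffix)
def fillRun (v : Int) : List Int → List Int
  | [] => []
  | x :: xs => if x = 0 then v :: fillRun v xs else x :: xs

lemma length_fillRun (v : Int) (xs : List Int) : (fillRun v xs).length = xs.length := by
  induction xs with
  | nil => rfl
  | cons x t ih =>
    rw [fillRun]
    by_cases hx : x = 0
    · rw [if_pos hx]; simpa using ih
    · rw [if_neg hx]

lemma pyFillA_eq (v : Int) (f : Nat) (l : List Int) (j : Nat) (hf : l.length ≤ j + f) :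
    pyFillA f l v j = l.take j ++ fillRun v (l.drop j) := by
  induction f generalizing l j with
  | zero =>
    rw [pyFillA, List.drop_eq_nil_of_le (by omega), List.take_of_length_le (by omega),
        show fillRun v ([] : List Int) = [] from rfl, List.append_nil]
  | succ f ih =>
    rw [pyFillA]
    by_cases h : j < l.length ∧ l.getD j 0 = 0
    · rw [if_pos h, ih (l.set j v) (j + 1) (by rw [List.length_set]; omega)]
      obtain ⟨hj, hz⟩ := h
      have hz' : l[j] = 0 := by
        rw [List.getD_eq_getElem?_getD, List.getElem?_eq_getElem hj] at hz
        simpa using hz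
      have hd : l.drop j = (0 : Int) :: l.drop (j + 1) := by
        rw [List.drop_eq_getElem_cons hj, hz']
      have hset : l.set j v = l.take j ++ v :: l.drop (j + 1) := by
        rw [List.set_eq_take_append_cons_drop, if_pos hj]
      have hlt : (l.take j).length = j := by rw [List.length_take]; omega
      have htk1 : (l.set j v).take (j + 1) = l.take j ++ [v] := by
        rw [hset, List.take_append, hlt, List.take_of_length_le (by omega),
            show j + 1 - j = 1 by omega]
        rfl
      have hdr1 : (l.set j v).drop (j + 1) = l.drop (j + 1) := by
        rw [List.drop_set, if_pos (by omega)]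
      rw [htk1, hdr1, hd, fillRun, if_pos rfl, List.append_assoc]
      rfl
    · rw [if_neg h]
      by_cases hj : j < l.length
      · have hz : ¬ l.getD j 0 = 0 := by tauto
        have hz' : ¬ l[j] = 0 := by
          rw [List.getD_eq_getElem?_getD, List.getElem?_eq_getElem hj] at hz
          simpa using hz
        rw [List.drop_eq_getElem_cons hj, fillRun, if_neg hz',
            ← List.drop_eq_getElem_cons hj]
        exact (List.take_append_drop j l).symm
      · rw [List.drop_eq_nil_of_le (by omega), List.take_of_length_le (by omega),
            show fillRun v ([] : List Int) = [] from rfl, List.append_nil]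

lemma goB_fillRun (v : Int) (hv : 0 < v) (xs : List Int) :
    goB v (fillRun v xs) = goB v xs := by
  induction xs with
  | nil => rfl
  | cons x t ih =>
    by_cases hx : x = 0
    · subst hx
      rw [fillRun, if_pos rfl, goB, goB, if_pos hv, if_neg (by norm_num),
          if_pos rfl, if_pos hv, ih]
    · rw [fillRun, if_neg hx]

lemma goB_zero_fillRun (v : Int) (hv : 0 < v) (xs : List Int) :
    goB 0 (fillRun v xs) = goB v xs := by
  cases xs with
  | nil => rfl
  | cons x t =>
    by_cases hx : x = 0
    · subst hx
      rw [fillRun, if_pos rfl, goB, goB, if_pos hv, if_neg (by norm_num),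
          if_pos rfl, if_pos hv, goB_fillRun v hv]
    · rw [fillRun, if_neg hx, goB, goB]
      by_cases hp : 0 < x
      · rw [if_pos hp, if_pos hp]
      · rw [if_neg hp, if_neg hp, if_neg hx, if_neg hx]

lemma main_inv (n : Nat) (l : List Int) (i : Nat) (hn : i + n = l.length)
    (hC : l.length ≤ i ∨ i = 0 ∨ ¬ 0 < l.getD (i - 1) 0 ∨ l.getD i 0 ≠ 0) :
    pyOuterA n l i = l.take i ++ goB 0 (l.drop i) := by
  induction n generalizing l i with
  | zero =>
    rw [pyOuterA, List.drop_eq_nil_of_le (by omega), List.take_of_length_le (by omega),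
        show goB 0 ([] : List Int) = [] from rfl, List.append_nil]
  | succ n ih =>
    have h : i < l.length := by omega
    rw [pyOuterA]
    set x := l.getD i 0 with hx
    have hxe : x = l[i] := by
      rw [hx, List.getD_eq_getElem?_getD, List.getElem?_eq_getElem h, Option.getD_some]
    have hd : l.drop i = x :: l.drop (i + 1) := by
      rw [List.drop_eq_getElem_cons h, hxe]
    have htk : l.take (i + 1) = l.take i ++ [x] := by
      rw [List.take_add_one, List.getElem?_eq_getElem h]
      simp [hxe]
    by_cases hp : 0 < x
    · -- fill branch
      rw [if_pos hp]
      set l' := pyFillA l.length l x (i + 1) with hl'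
      have hfe : l' = l.take (i + 1) ++ fillRun x (l.drop (i + 1)) :=
        pyFillA_eq x l.length l (i + 1) (by omega)
      have hll : l'.length = l.length := by
        rw [hfe, List.length_append, List.length_take, length_fillRun, List.length_drop]
        omega
      have hlen : (l.take (i + 1)).length = i + 1 := by rw [List.length_take]; omega
      have htk' : l'.take (i + 1) = l.take (i + 1) := by
        rw [hfe, List.take_append_of_le_length (by omega), List.take_take]
        simp
      have hdr' : l'.drop (i + 1) = fillRun x (l.drop (i + 1)) := by
        rw [hfe, List.drop_append_of_le_length (by omega)]
        rw [List.drop_eq_nil_of_le (by omega), List.nil_append]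
      have hcond : l'.length ≤ i + 1 ∨ i + 1 = 0 ∨ ¬ 0 < l'.getD (i + 1 - 1) 0 ∨ l'.getD (i + 1) 0 ≠ 0 := by
        by_cases hlt : i + 1 < l'.length
        · right; right; right
          have hg : l'.getD (i + 1) 0 = (l'.drop (i + 1)).getD 0 0 := by
            simp [List.getD_eq_getElem?_getD, List.getElem?_drop]
          rw [hg, hdr']
          cases hdt : l.drop (i + 1) with
          | nil =>
            exfalso
            have : (l.drop (i + 1)).length = 0 := by rw [hdt]; rfl
            rw [List.length_drop] at this
            omega
          | cons y t =>
            by_cases hy : y = 0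
            · simp [fillRun, hy]; omega
            · simp [fillRun, hy]
        · left; omega
      rw [ih l' (i + 1) (by omega) hcond, htk', hdr', goB_zero_fillRun x hp, hd, goB,
          if_pos hp, htk]
      simp
    · -- no fill: x = 0 (carry dead by hC) or x < 0
      rw [if_neg hp]
      have hcond : l.length ≤ i + 1 ∨ i + 1 = 0 ∨ ¬ 0 < l.getD (i + 1 - 1) 0 ∨ l.getD (i + 1) 0 ≠ 0 := by
        right; right; left; simpa using hp
      rw [ih l (i + 1) (by omega) hcond, hd, htk]
      by_cases hx0 : x = 0
      · have : ¬ 0 < l.getD (i - 1) 0 ∨ i = 0 := by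
          rcases hC with h1 | h1 | h1 | h1
          · omega
          · exact Or.inr h1
          · exact Or.inl h1
          · exact absurd hx0 h1
        rw [goB, if_neg hp, if_pos hx0, if_neg (by norm_num)]
        simp
      · rw [goB, if_neg hp, if_neg hx0]
        simp

-- ===== VERDICT (by name: the statement is the Claim_ definition above) =====
theorem change_intermediate_dynamics_values_spec : Claim_equal_change_intermediate_dynamics_values := by
  intro l _
  unfold Spec_change_intermediate_dynamics_values change_intermediate_dynamics_values change_intermediate_dynamics_values_alt
  rw [main_inv l.length l 0 (by omega) (Or.inr (Or.inl rfl))]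
  simp
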